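-- pv_equiv track=rewrite | github.com/argfrot/aoc2018 | day5/day5a.py | _collapse_line
-- ===== SOURCE A (Python) =====
-- def collapse_adjacent(c1, c2):
--     if c1.isupper() and c2.isupper():
--         return False
--     elif c1.islower() and c2.islower():
--         return False
--     elif c1.upper() == c2.upper():
--         return True
--     else:
--         return False
--
-- def _collapse_line(line):
--     last_char = None
--     for c in line:
--         if last_char is None:
--             last_char = c
--         elif collapse_adjacent(last_char, c):
--             last_char = None
--         else:
--             yield last_char
--             last_char = c
--     if last_char is not None:
--         yield last_char
-- ===== SOURCE B (Python) =====
-- def collapse_adjacent(c1, c2):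
--     if c1.isupper() and c2.isupper():
--         return False
--     elif c1.islower() and c2.islower():
--         return False
--     elif c1.upper() == c2.upper():
--         return True
--     else:
--         return False
--
-- def _collapse_line(line):
--     i = 0
--     n = len(line)
--     while i < n:
--         if i + 1 < n and collapse_adjacent(line[i], line[i + 1]):
--             i += 2
--         else:
--             yield line[i]
--             i += 1
-- ===== Notes on version B (the rewrite author's own statement) =====
-- stated objective: alternative
-- what changed: Replaces A's deferred-emission loop (one-slot last_char buffer with a None sentinel, three-way branch and post-loop flush) by direct pairwise lookahead on an index: consume two characters when they collapse, otherwise emit the current one.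
import Mathlib
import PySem

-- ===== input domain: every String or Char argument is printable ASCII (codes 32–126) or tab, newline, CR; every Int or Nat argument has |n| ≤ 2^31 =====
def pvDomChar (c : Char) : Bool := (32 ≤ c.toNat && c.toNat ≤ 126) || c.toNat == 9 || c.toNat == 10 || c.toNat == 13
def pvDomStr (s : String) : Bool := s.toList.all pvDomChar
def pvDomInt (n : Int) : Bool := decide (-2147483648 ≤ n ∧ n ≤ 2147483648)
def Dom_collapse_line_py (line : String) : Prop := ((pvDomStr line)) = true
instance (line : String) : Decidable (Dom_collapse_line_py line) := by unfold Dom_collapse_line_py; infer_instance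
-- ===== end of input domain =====

-- B replaces A's buffered deferred-emission loop with direct pairwise-lookahead recursion (alternative decomposition, same cost).


-- ===== PORT A =====
-- shared helper: collapse_adjacent (single-character strings iterate as chars; exact on ASCII)
def collapseAdjacent (c1 c2 : Char) : Bool :=
  if PySem.Chars.isupper c1 && PySem.Chars.isupper c2 then false
  else if PySem.Chars.islower c1 && PySem.Chars.islower c2 then false
  else if PySem.Chars.upperChar c1 == PySem.Chars.upperChar c2 then true
  else false

-- A's loop: last_char buffer (None sentinel), emitted one step late, flushed after the loop
def collapseLineA : List Char → Option Char → List String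
  | [], none => []
  | [], some l => [String.mk [l]]
  | c :: cs, none => collapseLineA cs (some c)
  | c :: cs, some l =>
      if collapseAdjacent l c then collapseLineA cs none
      else String.mk [l] :: collapseLineA cs (some c)

def collapse_line_py (line : String) : List String :=
  collapseLineA line.toList none

-- ===== PORT B =====
-- B's loop: pairwise lookahead; consume two chars when they collapse, else emit the head
def collapseLineB : List Char → List String
  | [] => []
  | [c] => [String.mk [c]]
  | c1 :: c2 :: rest =>
      if collapseAdjacent c1 c2 then collapseLineB rest
      else String.mk [c1] :: collapseLineB (c2 :: rest)

def collapse_line_py_alt (line : String) : List String :=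
  collapseLineB line.toList

-- ===== PRECONDITION & SPEC =====
def Spec_collapse_line_py (line : String) (out : List String) : Prop := out = collapse_line_py_alt line
instance (line : String) (out : List String) : Decidable (Spec_collapse_line_py line out) := by unfold Spec_collapse_line_py; infer_instance

-- ===== CLAIM (what is proved, stated in full; the proofs are below) =====
def Claim_equal_collapse_line_py : Prop := ∀ (line : String), Dom_collapse_line_py line → Spec_collapse_line_py line (collapse_line_py line)

-- ===== LEMMAS AND PROOFS =====
theorem collapseLineA_eq_B (cs : List Char) :
    collapseLineA cs none = collapseLineB cs ∧
    ∀ l, collapseLineA cs (some l) = collapseLineB (l :: cs) := by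
  induction cs with
  | nil => exact ⟨rfl, fun l => rfl⟩
  | cons c cs ih =>
    refine ⟨?_, fun l => ?_⟩
    · simpa [collapseLineA] using ih.2 c
    · show (if collapseAdjacent l c then collapseLineA cs none
            else String.mk [l] :: collapseLineA cs (some c)) =
          (if collapseAdjacent l c then collapseLineB cs
            else String.mk [l] :: collapseLineB (c :: cs))
      rw [ih.1, ih.2 c]

-- ===== VERDICT (by name: the statement is the Claim_ definition above) =====
theorem collapse_line_py_spec : Claim_equal_collapse_line_py := by
  intro line _
  unfold Spec_collapse_line_py collapse_line_py collapse_line_py_alt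
  exact (collapseLineA_eq_B line.toList).1
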